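-- pv_equiv track=rewrite | github.com/jiaola/usaco | bronze/socdist1/brute_force.py | count
-- ===== SOURCE A (Python) =====
-- def count(lst, i, j):
--     lst_cp = lst.copy()
--     lst_cp[i] = 1
--     lst_cp[j] = 1
--     mn = len(lst_cp)
--     first = True
--     cnt = 0
--     for i in range(len(lst_cp)):
--         if lst_cp[i] == 1:
--             if first:
--                 first = False
--             else:
--                 mn = min(cnt, mn)
--             cnt = 0
--         else:
--             cnt += 1
--     return mn
-- ===== SOURCE B (Python) =====
-- def count(lst, i, j):
--     lst_cp = list(lst)
--     lst_cp[i] = 1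
--     lst_cp[j] = 1
--     ones = [k for k, v in enumerate(lst_cp) if v == 1]
--     ds = [b - a - 1 for a, b in zip(ones, ones[1:])]
--     return min(ds) if ds else len(lst_cp)
-- ===== Notes on version B (the rewrite author's own statement) =====
-- stated objective: simpler
-- what changed: Replaces A's stateful flag/counter scan with a declarative pipeline: collect indices of ones, then take the min of consecutive index differences minus one, defaulting to len(lst) when fewer than two ones.
import Mathlib
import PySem

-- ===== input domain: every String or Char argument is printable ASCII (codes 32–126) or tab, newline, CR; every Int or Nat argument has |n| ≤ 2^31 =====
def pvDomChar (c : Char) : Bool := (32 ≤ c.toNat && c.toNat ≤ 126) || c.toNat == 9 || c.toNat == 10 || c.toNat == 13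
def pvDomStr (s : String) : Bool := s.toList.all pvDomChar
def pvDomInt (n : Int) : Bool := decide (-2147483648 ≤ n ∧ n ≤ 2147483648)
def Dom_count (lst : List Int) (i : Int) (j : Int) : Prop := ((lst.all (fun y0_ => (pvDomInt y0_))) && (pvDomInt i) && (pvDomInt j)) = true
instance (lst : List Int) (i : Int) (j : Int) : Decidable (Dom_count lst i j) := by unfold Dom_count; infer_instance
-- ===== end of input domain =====

/- B replaces A's flag/counter scan with: collect the indices of ones, take the min of consecutive
   differences minus one (objective: simpler decomposition; same O(n) cost). -/


-- ===== PORT A =====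
-- the body of A's for-loop, acting on the state (mn, first, cnt); x is lst_cp[i]
def stepA (st : Int × Bool × Int) (x : Int) : Int × Bool × Int :=
  if x = 1 then
    (if st.2.1 then (st.1, false, 0) else (min st.2.2 st.1, false, 0))
  else (st.1, st.2.1, st.2.2 + 1)

def count (lst : List Int) (i : Int) (j : Int) : Int :=
  let cp := PySem.List.pySetD (PySem.List.pySetD lst i 1) j 1
  ((PySem.List.pyRange 0 (cp.length : Int) 1).foldl
      (fun st k => stepA st (PySem.List.pyGetD cp k 0))
      ((cp.length : Int), true, 0)).1

-- ===== PORT B =====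
def count_alt (lst : List Int) (i : Int) (j : Int) : Int :=
  let cp := PySem.List.pySetD (PySem.List.pySetD lst i 1) j 1
  let ones := ((PySem.List.enumerate cp 0).filter (fun p => p.2 == 1)).map (fun p => p.1)
  let ds := (ones.zip (PySem.List.slice ones (some 1) none)).map (fun p => p.2 - p.1 - 1)
  match PySem.List.min? ds (fun x => x) with
  | some m => m
  | none => (cp.length : Int)

-- ===== PRECONDITION & SPEC =====
-- A raises IndexError when i or j is not a valid (possibly negative) index into lst; excluded.
def Pre_count (lst : List Int) (i : Int) (j : Int) : Prop :=
  PySem.Raise.InRange lst.length i ∧ PySem.Raise.InRange lst.length j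
instance (lst : List Int) (i : Int) (j : Int) : Decidable (Pre_count lst i j) := by unfold Pre_count; infer_instance

def pvWitness_count : List Int × Int × Int := ([0, 1, 0, 0], 0, -1)

def Spec_count (lst : List Int) (i : Int) (j : Int) (out : Int) : Prop := out = count_alt lst i j
instance (lst : List Int) (i : Int) (j : Int) (out : Int) : Decidable (Spec_count lst i j out) := by unfold Spec_count; infer_instance

-- ===== CLAIM (what is proved, stated in full; the proofs are below) =====
def Claim_equal_count : Prop := ∀ (lst : List Int) (i : Int) (j : Int), Dom_count lst i j → Pre_count lst i j → Spec_count lst i j (count lst i j)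

-- ===== LEMMAS AND PROOFS =====

-- gap lengths between consecutive ones, in order (after the first 1 has been seen; cnt zeros pending)
def gapsAux : List Int → Int → List Int
  | [], _ => []
  | x :: xs, cnt => if x = 1 then cnt :: gapsAux xs 0 else gapsAux xs (cnt + 1)

def gapList : List Int → List Int
  | [] => []
  | x :: xs => if x = 1 then gapsAux xs 0 else gapList xs

-- indices (starting at n) of the elements equal to 1
def onesFrom (L : List Int) (n : Int) : List Int :=
  ((PySem.List.enumerate L n).filter (fun p => p.2 == 1)).map (fun p => p.1)

-- consecutive differences minus one
def dz (l : List Int) : List Int := (l.zip l.tail).map (fun p => p.2 - p.1 - 1)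

theorem onesFrom_cons (x : Int) (xs : List Int) (n : Int) :
    onesFrom (x :: xs) n =
      if x = 1 then n :: onesFrom xs (n + 1) else onesFrom xs (n + 1) := by
  simp only [onesFrom, PySem.List.enumerate_cons, List.filter_cons]
  by_cases h : x = 1 <;> simp [h]

theorem dz_cons_cons (a b : Int) (r : List Int) :
    dz (a :: b :: r) = (b - a - 1) :: dz (b :: r) := rfl

theorem foldlA_false (L : List Int) : ∀ (mn cnt : Int),
    (L.foldl stepA (mn, false, cnt)).1 = (gapsAux L cnt).foldl min mn := by
  induction L with
  | nil => intro mn cnt; rfl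
  | cons x xs ih =>
    intro mn cnt
    by_cases h : x = 1 <;>
      simp [List.foldl_cons, stepA, h, gapsAux, ih, min_comm cnt mn]

theorem foldlA_true (L : List Int) : ∀ (mn cnt : Int),
    (L.foldl stepA (mn, true, cnt)).1 = (gapList L).foldl min mn := by
  induction L with
  | nil => intro mn cnt; rfl
  | cons x xs ih =>
    intro mn cnt
    by_cases h : x = 1 <;>
      simp [List.foldl_cons, stepA, h, gapList, ih, foldlA_false]

theorem dz_onesFrom_aux (xs : List Int) : ∀ (n p cnt : Int), n - p - 1 = cnt →
    dz (p :: onesFrom xs n) = gapsAux xs cnt := by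
  induction xs with
  | nil => intro n p cnt h; rfl
  | cons x xs ih =>
    intro n p cnt h
    by_cases hx : x = 1
    · rw [onesFrom_cons, if_pos hx, dz_cons_cons, gapsAux, if_pos hx, ← h,
        ih (n + 1) n 0 (by omega)]
    · rw [onesFrom_cons, if_neg hx, gapsAux, if_neg hx,
        ih (n + 1) p (cnt + 1) (by omega)]

theorem dz_onesFrom (xs : List Int) : ∀ (n : Int), dz (onesFrom xs n) = gapList xs := by
  induction xs with
  | nil => intro n; rfl
  | cons x xs ih =>
    intro n
    by_cases hx : x = 1
    · rw [onesFrom_cons, if_pos hx, gapList, if_pos hx,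
        dz_onesFrom_aux xs (n + 1) n 0 (by omega)]
    · rw [onesFrom_cons, if_neg hx, gapList, if_neg hx, ih]

theorem mem_gapsAux_le (xs : List Int) : ∀ (cnt d : Int), 0 ≤ cnt →
    d ∈ gapsAux xs cnt → d ≤ cnt + (xs.length : Int) - 1 := by
  induction xs with
  | nil => intro cnt d _ h; simp [gapsAux] at h
  | cons x xs ih =>
    intro cnt d hc h
    by_cases hx : x = 1
    · simp only [gapsAux, if_pos hx, List.mem_cons] at h
      rcases h with h | h
      · simp [h]
      · have := ih 0 d le_rfl h; simp at *; omega
    · simp only [gapsAux, if_neg hx] at h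
      have := ih (cnt + 1) d (by omega) h; simp at *; omega

theorem mem_gapList_lt (xs : List Int) (d : Int) (h : d ∈ gapList xs) :
    d < (xs.length : Int) := by
  induction xs with
  | nil => simp [gapList] at h
  | cons x xs ih =>
    by_cases hx : x = 1
    · simp only [gapList, if_pos hx] at h
      have := mem_gapsAux_le xs 0 d le_rfl h
      simp at *; omega
    · simp only [gapList, if_neg hx] at h
      have := ih h; simp; omega

theorem foldl_min_le (l : List Int) : ∀ (a : Int), l.foldl min a ≤ a := by
  induction l with
  | nil => intro a; simp
  | cons x xs ih =>
    intro a
    calc xs.foldl min (min a x) ≤ min a x := ih _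
      _ ≤ a := min_le_left _ _

theorem foldl_min_cons (ds : List Int) : ∀ (mn d : Int),
    (d :: ds).foldl min mn = min mn (ds.foldl min d) := by
  induction ds with
  | nil => intro mn d; rfl
  | cons e ds ih =>
    intro mn d
    show (e :: ds).foldl min (min mn d) = min mn ((e :: ds).foldl min d)
    rw [ih (min mn d) e, ih d e, min_assoc]

-- core: A's scan equals B's ones/diffs computation, for ANY list L
theorem core (L : List Int) :
    ((PySem.List.pyRange 0 (L.length : Int) 1).foldl
        (fun st k => stepA st (PySem.List.pyGetD L k 0))
        ((L.length : Int), true, 0)).1 =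
      (match PySem.List.min? (dz (onesFrom L 0)) (fun x => x) with
       | some m => m
       | none => (L.length : Int)) := by
  rw [PySem.List.foldl_pyRange_zero_pyGetD' L 0 stepA ((L.length : Int), true, 0)]
  rw [foldlA_true L (L.length : Int) 0, ← dz_onesFrom L 0]
  cases hds : dz (onesFrom L 0) with
  | nil => rfl
  | cons d ds =>
    rw [PySem.List.min?_id_cons, foldl_min_cons]
    have hmem : ∀ y ∈ d :: ds, y < (L.length : Int) := by
      intro y hy
      exact mem_gapList_lt L y (by rw [← dz_onesFrom L 0, hds]; exact hy)
    have h1 : ds.foldl min d ≤ d := foldl_min_le ds d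
    have h2 : d < (L.length : Int) := hmem d (List.mem_cons_self)
    exact min_eq_right (by omega)

-- ===== VERDICT (by name: the statement is the Claim_ definition above) =====
theorem count_spec : Claim_equal_count := by
  intro lst i j _ _
  show count lst i j = count_alt lst i j
  unfold count count_alt
  simp only [PySem.List.slice_from_one]
  exact core _
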